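-- pv_equiv track=rewrite | github.com/Utkarsh09102004/resume-review-ai | backend/app/mcp/tools.py | _format_context_with_line_numbers
-- ===== SOURCE A (Python) =====
-- def _format_context_with_line_numbers(
--     text: str,
--     start_index: int,
--     end_index: int,
--     context_lines: int = 1,
-- ) -> tuple[str, str]:
--     lines = text.splitlines()
--     if not lines:
--         lines = [""]
--
--     total_lines = len(lines)
--     start_line = _line_number_at_index(text, start_index)
--     end_reference_index = start_index if end_index <= start_index else end_index - 1
--     end_line = _line_number_at_index(text, end_reference_index)
--
--     snippet_start_line = max(1, start_line - context_lines)
--     snippet_end_line = min(total_lines, end_line + context_lines)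
--     snippet = "\n".join(
--         f"{line_number}\t{lines[line_number - 1]}" for line_number in range(snippet_start_line, snippet_end_line + 1)
--     )
--
--     return _format_line_range(text, start_index, end_index), snippet
--
-- def _format_line_range(text: str, start_index: int, end_index: int) -> str:
--     start_line = _line_number_at_index(text, start_index)
--     end_reference_index = start_index if end_index <= start_index else end_index - 1
--     end_line = _line_number_at_index(text, end_reference_index)
--     if start_line == end_line:
--         return f"line {start_line}"
--     return f"lines {start_line}-{end_line}"
--
-- def _line_number_at_index(text: str, index: int) -> int:
--     bounded_index = max(0, min(index, len(text)))
--     return text.count("\n", 0, bounded_index) + 1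
-- ===== SOURCE B (Python) =====
-- def _format_context_with_line_numbers(
--     text: str,
--     start_index: int,
--     end_index: int,
--     context_lines: int = 1,
-- ) -> tuple[str, str]:
--     # Build a sorted table of line-start offsets once; each line-number query is
--     # then a hand-rolled binary search (bisect_right) over the table instead of a
--     # prefix newline-count scan through the text.
--     n = len(text)
--     starts = [0]
--     for i, ch in enumerate(text):
--         if ch == "\n":
--             starts.append(i + 1)
--
--     def line_no(index):
--         b = max(0, min(index, n))
--         lo, hi = 0, len(starts)
--         while lo < hi:
--             mid = (lo + hi) // 2
--             if starts[mid] <= b: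
--                 lo = mid + 1
--             else:
--                 hi = mid
--         return lo
--
--     start_line = line_no(start_index)
--     ref = start_index if end_index <= start_index else end_index - 1
--     end_line = line_no(ref)
--     label = f"line {start_line}" if start_line == end_line else f"lines {start_line}-{end_line}"
--     lines = text.splitlines() or [""]
--     lo_l = max(1, start_line - context_lines)
--     hi_l = min(len(lines), end_line + context_lines)
--     snippet = "\n".join(
--         f"{k}\t{line}" for k, line in enumerate(lines[lo_l - 1 : max(0, hi_l)], lo_l)
--     )
--     return label, snippet
-- ===== Notes on version B (the rewrite author's own statement) =====
-- stated objective: alternative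
-- what changed: B replaces A's per-query prefix scans (four text.count('\n',0,i) passes through two helpers) with a line-start offset table built in one pass and a hand-rolled bisect_right binary search per line-number query; the snippet is built by enumerating a slice of the lines list instead of indexing lines[k-1] over a range.
import Mathlib
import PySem

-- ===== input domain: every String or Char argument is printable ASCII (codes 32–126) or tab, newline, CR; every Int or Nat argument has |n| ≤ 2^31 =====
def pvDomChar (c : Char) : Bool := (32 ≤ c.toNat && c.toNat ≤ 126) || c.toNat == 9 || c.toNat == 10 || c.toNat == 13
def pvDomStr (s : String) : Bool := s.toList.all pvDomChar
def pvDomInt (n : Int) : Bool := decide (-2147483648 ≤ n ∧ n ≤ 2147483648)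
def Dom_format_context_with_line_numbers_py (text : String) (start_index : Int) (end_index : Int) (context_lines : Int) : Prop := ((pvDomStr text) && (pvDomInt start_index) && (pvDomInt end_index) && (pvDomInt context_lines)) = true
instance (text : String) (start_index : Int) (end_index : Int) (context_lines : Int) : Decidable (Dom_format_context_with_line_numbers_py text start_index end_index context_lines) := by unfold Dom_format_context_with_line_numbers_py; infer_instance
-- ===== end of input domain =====

-- B builds a sorted table of line-start offsets once and answers each line-number query by a
-- hand-rolled binary search over it, instead of A's per-query prefix newline-count scans; same results.

-- ===== PORT A =====
-- text.count("\n", 0, bounded) ported as List.count '\n' over the slice text[0:bounded]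
-- (exact: str.count's start/end are slice bounds, and for a 1-char needle count is List.count)
def pvLineNumberAtIndex (text : String) (index : Int) : Int :=
  ((PySem.List.slice text.toList (some 0)
      (some (max 0 (min index (PySem.Str.len text))))).count '\n' : Int) + 1

def pvFormatLineRange (text : String) (start_index : Int) (end_index : Int) : String :=
  let start_line := pvLineNumberAtIndex text start_index
  let end_reference_index := if end_index ≤ start_index then start_index else end_index - 1
  let end_line := pvLineNumberAtIndex text end_reference_index
  if start_line == end_line then "line " ++ PySem.Int.toStr start_line
  else "lines " ++ PySem.Int.toStr start_line ++ "-" ++ PySem.Int.toStr end_line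

def format_context_with_line_numbers_py (text : String) (start_index : Int) (end_index : Int) (context_lines : Int) : String × String :=
  let lines0 := PySem.Str.splitlines text
  let lines := if lines0.isEmpty then [""] else lines0
  let total_lines : Int := lines.length
  let start_line := pvLineNumberAtIndex text start_index
  let end_reference_index := if end_index ≤ start_index then start_index else end_index - 1
  let end_line := pvLineNumberAtIndex text end_reference_index
  let snippet_start_line := max 1 (start_line - context_lines)
  let snippet_end_line := min total_lines (end_line + context_lines)
  -- lines[line_number - 1] ported with pyGetD "" (exact: every generated index is in range)
  let snippet := PySem.Str.join "\n"
      ((PySem.List.pyRange snippet_start_line (snippet_end_line + 1) 1).map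
        (fun line_number => PySem.Int.toStr line_number ++ "\t" ++ PySem.List.pyGetD lines (line_number - 1) ""))
  (pvFormatLineRange text start_index end_index, snippet)

-- ===== PORT B =====
-- the inline fold step of Source B's table-building loop, named for reuse in the lemmas
def pvStep : List Int → Int × Char → List Int :=
  fun acc q => if q.2 == '\n' then acc ++ [q.1 + 1] else acc

-- the hand-written while-loop bisect_right of Source B; starts[mid] ported with pyGetD 0
-- (exact: mid is always within range when called as in Source B)
def pvBisect (starts : List Int) (b : Int) (lo hi : Int) : Int :=
  if h : lo < hi then
    let mid := PySem.Int.floordiv (lo + hi) 2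
    if PySem.List.pyGetD starts mid 0 ≤ b then pvBisect starts b (mid + 1) hi
    else pvBisect starts b lo mid
  else lo
termination_by (hi - lo).toNat
decreasing_by
  · have := PySem.Int.floordiv_two_mid_bounds (le_of_lt h)
    omega
  · have := PySem.Int.floordiv_two_mid_bounds (le_of_lt h)
    have hne : PySem.Int.floordiv (lo + hi) 2 ≠ hi := by
      intro he
      have : lo + hi < hi + hi := by omega
      have h2 := (PySem.Int.floordiv_eq_iff_of_pos (a := lo + hi) (b := 2) (q := hi) (by omega)).mp he
      omega
    omega

def pvLineNo (starts : List Int) (n index : Int) : Int :=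
  pvBisect starts (max 0 (min index n)) 0 (starts.length : Int)

def format_context_with_line_numbers_py_alt (text : String) (start_index : Int) (end_index : Int) (context_lines : Int) : String × String :=
  let n : Int := PySem.Str.len text
  let starts := (PySem.List.enumerate text.toList 0).foldl pvStep [(0 : Int)]
  let start_line := pvLineNo starts n start_index
  let ref := if end_index ≤ start_index then start_index else end_index - 1
  let end_line := pvLineNo starts n ref
  let label := if start_line == end_line then "line " ++ PySem.Int.toStr start_line
               else "lines " ++ PySem.Int.toStr start_line ++ "-" ++ PySem.Int.toStr end_line
  let lines0 := PySem.Str.splitlines text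
  let lines := if lines0.isEmpty then [""] else lines0
  let lo := max 1 (start_line - context_lines)
  let hi := min (lines.length : Int) (end_line + context_lines)
  let snippet := PySem.Str.join "\n"
      ((PySem.List.enumerate (PySem.List.slice lines (some (lo - 1)) (some (max 0 hi))) lo).map
        (fun q => PySem.Int.toStr q.1 ++ "\t" ++ q.2))
  (label, snippet)

-- ===== PRECONDITION & SPEC =====
def Spec_format_context_with_line_numbers_py (text : String) (start_index : Int) (end_index : Int) (context_lines : Int) (out : String × String) : Prop := out = format_context_with_line_numbers_py_alt text start_index end_index context_lines
instance (text : String) (start_index : Int) (end_index : Int) (context_lines : Int) (out : String × String) : Decidable (Spec_format_context_with_line_numbers_py text start_index end_index context_lines out) := by unfold Spec_format_context_with_line_numbers_py; infer_instance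

-- ===== CLAIM (what is proved, stated in full; the proofs are below) =====
def Claim_equal_format_context_with_line_numbers_py : Prop := ∀ (text : String) (start_index : Int) (end_index : Int) (context_lines : Int), Dom_format_context_with_line_numbers_py text start_index end_index context_lines → Spec_format_context_with_line_numbers_py text start_index end_index context_lines (format_context_with_line_numbers_py text start_index end_index context_lines)

-- ===== LEMMAS AND PROOFS =====

-- the table is nondecreasing (all elements stay ≤ the running index)
theorem pvStartsChain (cs : List Char) : ∀ (s : Int) (acc : List Int),
    acc.Pairwise (· ≤ ·) → (∀ x ∈ acc, x ≤ s) →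
    ((PySem.List.enumerate cs s).foldl pvStep acc).Pairwise (· ≤ ·) := by
  induction cs with
  | nil => intro s acc h _; simpa [PySem.List.enumerate_nil] using h
  | cons c cs ih =>
    intro s acc h hle
    rw [PySem.List.enumerate_cons, List.foldl_cons]
    by_cases hc : c = '\n'
    · have : pvStep acc (s, c) = acc ++ [s + 1] := by simp [pvStep, hc]
      rw [this]
      apply ih (s + 1)
      · rw [List.pairwise_append]
        exact ⟨h, by simp, by intro a ha b hb; simp at hb; subst hb; exact le_trans (hle a ha) (by omega)⟩
      · intro x hx
        rcases List.mem_append.mp hx with h1 | h1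
        · exact le_trans (hle x h1) (by omega)
        · simp at h1; omega
    · have : pvStep acc (s, c) = acc := by simp [pvStep, hc]
      rw [this]
      exact ih (s + 1) acc h (fun x hx => le_trans (hle x hx) (by omega))

-- counting table entries ≤ b = counting newlines before position b
theorem pvStartsCount (cs : List Char) (b : Int) : ∀ (s : Int) (acc : List Int),
    (((PySem.List.enumerate cs s).foldl pvStep acc).countP (fun x => decide (x ≤ b)) : Int)
      = (acc.countP (fun x => decide (x ≤ b)) : Int) + ((cs.take (b - s).toNat).count '\n' : Int) := by
  induction cs with
  | nil => intro s acc; simp [PySem.List.enumerate_nil]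
  | cons c cs ih =>
    intro s acc
    rw [PySem.List.enumerate_cons, List.foldl_cons]
    by_cases hc : c = '\n'
    · subst hc
      have htake : ((('\n') :: cs).take (b - s).toNat).count '\n'
          = (if s < b then 1 else 0) + (cs.take (b - (s+1)).toNat).count '\n' := by
        by_cases hx : s < b
        · have h1 : (b - s).toNat = (b - (s+1)).toNat + 1 := by omega
          simp [h1, List.take_succ_cons, hx]
          omega
        · have h1 : (b - s).toNat = 0 := by omega
          have h2 : (b - (s+1)).toNat = 0 := by omega
          simp [h1, h2, hx]
      have hstep : pvStep acc (s, '\n') = acc ++ [s + 1] := by simp [pvStep]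
      rw [hstep, ih (s + 1), htake, List.countP_append]
      by_cases hsb : s < b
      · have h1 : decide ((s : Int) + 1 ≤ b) = true := by simp; omega
        simp only [List.countP_cons, List.countP_nil, h1, if_pos hsb]
        push_cast; ring
      · have h1 : decide ((s : Int) + 1 ≤ b) = false := by simp; omega
        simp only [List.countP_cons, List.countP_nil, h1, if_neg hsb]
        push_cast; ring
    · have htake : ((c :: cs).take (b - s).toNat).count '\n'
          = (cs.take (b - (s+1)).toNat).count '\n' := by
        by_cases hx : s < b
        · have h1 : (b - s).toNat = (b - (s+1)).toNat + 1 := by omega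
          simp [h1, List.take_succ_cons, hc]
        · have h1 : (b - s).toNat = 0 := by omega
          have h2 : (b - (s+1)).toNat = 0 := by omega
          simp [h1, h2]
      have hstep : pvStep acc (s, c) = acc := by simp [pvStep, hc]
      rw [hstep, ih (s + 1), htake]

-- on a nondecreasing table, indices below countP (· ≤ b) satisfy ≤ b and the rest do not
theorem pvSortedCount (b : Int) : ∀ (l : List Int), l.Pairwise (· ≤ ·) →
    (∀ i : Nat, (i : Int) < (l.countP (fun x => decide (x ≤ b)) : Int) → l.getD i 0 ≤ b) ∧
    (∀ i : Nat, (l.countP (fun x => decide (x ≤ b)) : Int) ≤ (i : Int) → i < l.length → ¬ l.getD i 0 ≤ b) := by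
  intro l
  induction l with
  | nil => intro _; exact ⟨by intro i h; simp at h; omega, by intro i _ h; simp at h⟩
  | cons x xs ih =>
    intro h
    rw [List.pairwise_cons] at h
    obtain ⟨hhead, htail⟩ := h
    obtain ⟨ih1, ih2⟩ := ih htail
    by_cases hx : x ≤ b
    · have hcount : (x :: xs).countP (fun x => decide (x ≤ b)) = xs.countP (fun x => decide (x ≤ b)) + 1 := by
        simp [hx]
      constructor
      · intro i hi
        cases i with
        | zero => simpa using hx
        | succ j =>
          have : (j : Int) < (xs.countP (fun x => decide (x ≤ b)) : Int) := by
            rw [hcount] at hi; push_cast at hi ⊢; omega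
          simpa using ih1 j this
      · intro i hi hlen
        cases i with
        | zero => rw [hcount] at hi; push_cast at hi; omega
        | succ j =>
          have : (xs.countP (fun x => decide (x ≤ b)) : Int) ≤ (j : Int) := by
            rw [hcount] at hi; push_cast at hi ⊢; omega
          simpa using ih2 j this (by simpa using hlen)
    · have hzero : (x :: xs).countP (fun x => decide (x ≤ b)) = 0 := by
        rw [List.countP_eq_zero]
        intro y hy
        rcases List.mem_cons.mp hy with rfl | hy'
        · simpa using hx
        · simp only [decide_eq_true_eq]
          intro hyb; exact hx (le_trans (hhead y hy') hyb)
      constructor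
      · intro i hi; rw [hzero] at hi; simp at hi; omega
      · intro i _ hlen
        cases i with
        | zero => simpa using hx
        | succ j =>
          simp only [List.getD_cons_succ]
          intro hyb
          have hmem : xs.getD j 0 ∈ xs := by
            rw [List.getD_eq_getElem _ _ (by simpa using hlen)]
            exact List.getElem_mem _
          exact hx (le_trans (hhead _ hmem) hyb)

-- the binary search returns the boundary index k
theorem pvBisect_eq (l : List Int) (b : Int) :
    ∀ (lo hi k : Int), 0 ≤ lo → lo ≤ k → k ≤ hi → hi ≤ (l.length : Int) →
    (∀ i : Nat, (i : Int) < k → l.getD i 0 ≤ b) →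
    (∀ i : Nat, k ≤ (i : Int) → i < l.length → ¬ l.getD i 0 ≤ b) →
    pvBisect l b lo hi = k := by
  have H : ∀ (m : Nat) (lo hi k : Int), (hi - lo).toNat = m → 0 ≤ lo → lo ≤ k → k ≤ hi → hi ≤ (l.length : Int) →
      (∀ i : Nat, (i : Int) < k → l.getD i 0 ≤ b) →
      (∀ i : Nat, k ≤ (i : Int) → i < l.length → ¬ l.getD i 0 ≤ b) →
      pvBisect l b lo hi = k := by
    intro m
    induction m using Nat.strong_induction_on with
    | _ m ih =>
      intro lo hi k hm h0 hlk hkh hhl h1 h2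
      rw [pvBisect]
      by_cases h : lo < hi
      · rw [dif_pos h]
        have hmid := PySem.Int.floordiv_two_mid_bounds (le_of_lt h)
        have hne : PySem.Int.floordiv (lo + hi) 2 ≠ hi := by
          intro he
          have h2' := (PySem.Int.floordiv_eq_iff_of_pos (a := lo + hi) (b := 2) (q := hi) (by omega)).mp he
          omega
        set mid := PySem.Int.floordiv (lo + hi) 2 with hmiddef
        have hmidn : ((mid.toNat : Nat) : Int) = mid := by omega
        have hget : PySem.List.pyGetD l mid 0 = l.getD mid.toNat 0 := by
          rw [← hmidn, PySem.List.pyGetD_natCast, Int.toNat_natCast]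
        by_cases hle : PySem.List.pyGetD l mid 0 ≤ b
        · rw [if_pos hle]
          have hmk : mid < k := by
            by_contra hnk
            push Not at hnk
            exact (h2 mid.toNat (by omega) (by omega)) (hget ▸ hle)
          exact ih (hi - (mid + 1)).toNat (by omega) (mid + 1) hi k rfl (by omega) (by omega) hkh hhl h1 h2
        · rw [if_neg hle]
          have hkm : k ≤ mid := by
            by_contra hnk
            push Not at hnk
            exact hle (hget ▸ h1 mid.toNat (by omega))
          exact ih (mid - lo).toNat (by omega) lo mid k rfl h0 hlk hkm (by omega) h1 h2
      · rw [dif_neg h]; omega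
  intro lo hi k
  exact H (hi - lo).toNat lo hi k rfl

-- A's helper as a prefix-take newline count
theorem pvLineNumber_eq (text : String) (index : Int) :
    pvLineNumberAtIndex text index
      = ((text.toList.take (max 0 (min index (PySem.Str.len text))).toNat).count '\n' : Int) + 1 := by
  unfold pvLineNumberAtIndex
  rw [PySem.List.slice_zero_start, PySem.List.slice_to _ (le_max_left _ _)]

-- B's line_no (table + binary search) equals A's line-number helper
theorem pvLineNo_eq (text : String) (index : Int) :
    pvLineNo ((PySem.List.enumerate text.toList 0).foldl pvStep [(0 : Int)]) (PySem.Str.len text) index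
      = pvLineNumberAtIndex text index := by
  set b := max 0 (min index (PySem.Str.len text)) with hb
  have hb0 : 0 ≤ b := le_max_left _ _
  set starts := (PySem.List.enumerate text.toList 0).foldl pvStep [(0 : Int)] with hstarts
  have hpw : starts.Pairwise (· ≤ ·) :=
    pvStartsChain text.toList 0 [(0 : Int)] (by simp) (by intro x hx; simp at hx; omega)
  have hcnt : ((starts.countP (fun x => decide (x ≤ b))) : Int)
      = ((text.toList.take b.toNat).count '\n' : Int) + 1 := by
    rw [hstarts, pvStartsCount text.toList b 0 [(0 : Int)]]
    have : decide ((0 : Int) ≤ b) = true := by simpa using hb0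
    simp [this]
    omega
  obtain ⟨hA, hB⟩ := pvSortedCount b starts hpw
  have hres : pvBisect starts b 0 (starts.length : Int) = ((starts.countP (fun x => decide (x ≤ b))) : Int) :=
    pvBisect_eq starts b 0 (starts.length : Int) _ (le_refl 0) (by positivity)
      (by exact_mod_cast List.countP_le_length) (le_refl _) hA hB
  unfold pvLineNo
  rw [← hb, hres, hcnt, pvLineNumber_eq]

-- the range-indexed snippet rows equal the enumerated slice rows
theorem pvSnippetRows (lines : List String) (lo hi : Int)
    (hlo : 1 ≤ lo) (hhi : hi ≤ (lines.length : Int)) :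
    (PySem.List.pyRange lo (hi + 1) 1).map
        (fun k => PySem.Int.toStr k ++ "\t" ++ PySem.List.pyGetD lines (k - 1) "")
    = (PySem.List.enumerate (PySem.List.slice lines (some (lo - 1)) (some (max 0 hi))) lo).map
        (fun q => PySem.Int.toStr q.1 ++ "\t" ++ q.2) := by
  have hs : PySem.List.slice lines (some (lo - 1)) (some (max 0 hi))
      = List.take ((max 0 hi).toNat - (lo - 1).toNat) (List.drop (lo - 1).toNat lines) :=
    PySem.List.slice_toNat lines (by omega) (le_max_left _ _)
  apply List.ext_getElem
  · simp only [hs, List.length_map, PySem.List.length_pyRange_one,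
      PySem.List.length_enumerate, List.length_take, List.length_drop]
    omega
  · intro k h1 h2
    have hk1 : k < (hi + 1 - lo).toNat := by
      simpa [PySem.List.length_pyRange_one] using h1
    have hkl : (lo - 1).toNat + k < lines.length := by omega
    simp only [List.getElem_map, PySem.List.getElem_pyRange_one, hs,
      PySem.List.getElem_enumerate, List.getElem_take, List.getElem_drop]
    have hidx : (lo + (k : Int) - 1) = (((lo - 1).toNat + k : Nat) : Int) := by
      push_cast; omega
    rw [hidx, PySem.List.pyGetD_natCast, List.getD_eq_getElem _ _ hkl]

-- ===== VERDICT (by name: the statement is the Claim_ definition above) =====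
theorem format_context_with_line_numbers_py_spec : Claim_equal_format_context_with_line_numbers_py := by
  intro text start_index end_index context_lines _hdom
  unfold Spec_format_context_with_line_numbers_py
  unfold format_context_with_line_numbers_py format_context_with_line_numbers_py_alt pvFormatLineRange
  dsimp only []
  rw [pvLineNo_eq, pvLineNo_eq]
  refine Prod.ext rfl ?_
  exact congrArg (PySem.Str.join "\n") (pvSnippetRows _ _ _ (le_max_left _ _) (min_le_left _ _))
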